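-- pv_equiv track=rewrite | github.com/Javierbj02/ontology-guided-world-model-maintenance | Explanations/src/benchmark/retrieval_context_builder.py | _closure_from_seeds
-- ===== SOURCE A (Python) =====
-- from typing import Dict, Iterable, List, Set, Tuple
--
-- def _closure_from_seeds(
--     seeds: Set[str],
--     child_map: Dict[str, Set[str]],
-- ) -> List[str]:
--     visited: Set[str] = set()
--     stack: List[str] = sorted(seeds)
--
--     while stack:
--         cur = stack.pop()
--         if cur in visited:
--             continue
--         visited.add(cur)
--         for child in sorted(child_map.get(cur, set()), reverse=True):
--             if child not in visited:
--                 stack.append(child)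
--
--     return sorted(visited)
-- ===== SOURCE B (Python) =====
-- from typing import Dict, List, Set
--
--
-- def _closure_from_seeds(
--     seeds: Set[str],
--     child_map: Dict[str, Set[str]],
-- ) -> List[str]:
--     result: Set[str] = set(seeds)
--     frontier: Set[str] = set(seeds)
--     while frontier:
--         nxt: Set[str] = set()
--         for n in frontier:
--             nxt |= child_map.get(n, set())
--         frontier = nxt - result
--         result |= frontier
--     return sorted(result)
-- ===== Notes on version B (the rewrite author's own statement) =====
-- stated objective: alternative
-- what changed: Replaced the node-at-a-time DFS stack with per-node visited checks and sorted pushes by a level-synchronous frontier closure: each round unions all children of the whole frontier and takes the set difference against the accumulated result, with no stack and no per-node sorting during traversal.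
import Mathlib
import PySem

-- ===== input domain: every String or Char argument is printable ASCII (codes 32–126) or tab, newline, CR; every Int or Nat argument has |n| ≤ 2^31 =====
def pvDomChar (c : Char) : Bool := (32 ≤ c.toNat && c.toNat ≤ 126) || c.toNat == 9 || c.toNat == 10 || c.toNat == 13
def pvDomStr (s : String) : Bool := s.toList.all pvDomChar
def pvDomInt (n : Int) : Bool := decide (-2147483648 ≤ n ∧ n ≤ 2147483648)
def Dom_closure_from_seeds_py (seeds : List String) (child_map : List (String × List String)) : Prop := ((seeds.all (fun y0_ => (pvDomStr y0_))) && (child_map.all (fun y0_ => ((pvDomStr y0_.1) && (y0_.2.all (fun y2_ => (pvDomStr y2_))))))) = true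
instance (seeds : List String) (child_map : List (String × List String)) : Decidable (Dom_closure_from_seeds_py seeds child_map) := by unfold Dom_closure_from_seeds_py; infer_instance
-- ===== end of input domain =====

-- B replaces A's node-at-a-time DFS stack (per-node visited checks, sorted pushes) by a
-- level-synchronous frontier closure using whole-set union and difference; same return value.

-- child_map.get(cur, set()) (the lookup both Pythons perform)
def pvChildren (cm : List (String × List String)) (x : String) : List String :=
  (PySem.Dict.mk cm).getD x []

-- all strings a lookup in cm can produce, plus all keys (used only for termination bounds)
def pvUniv (cm : List (String × List String)) : List String :=
  cm.flatMap (fun p => p.1 :: p.2)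

theorem pvChildren_cons (k : String) (v : List String) (rest : List (String × List String))
    (x : String) :
    pvChildren ((k, v) :: rest) x = if k == x then v else pvChildren rest x := by
  unfold pvChildren
  rw [PySem.Dict.getD_eq_get?_getD, PySem.Dict.get?_mk_cons]
  split <;> simp [PySem.Dict.getD_eq_get?_getD]

-- the lookup either misses every key or returns the value of some key equal to x
theorem pvChildren_spec (cm : List (String × List String)) (x : String) :
    (pvChildren cm x = [] ∧ ∀ p ∈ cm, p.1 ≠ x) ∨
    ∃ p ∈ cm, p.1 = x ∧ pvChildren cm x = p.2 := by
  induction cm with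
  | nil => exact Or.inl ⟨rfl, by simp⟩
  | cons p rest ih =>
      obtain ⟨k, v⟩ := p
      rw [pvChildren_cons]
      by_cases h : k = x
      · exact Or.inr ⟨(k, v), List.mem_cons_self .., h, by simp [h]⟩
      · have hb : (k == x) = false := by simp [h]
        rw [hb]
        simp only [Bool.false_eq_true, if_false]
        rcases ih with ⟨h1, h2⟩ | ⟨q, hq, hk, hv⟩
        · refine Or.inl ⟨h1, ?_⟩
          intro q hq
          rcases List.mem_cons.mp hq with rfl | hq'
          · exact h
          · exact h2 q hq'
        · exact Or.inr ⟨q, List.mem_cons_of_mem _ hq, hk, hv⟩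

theorem mem_pvChildren_mem_univ (cm : List (String × List String)) (x y : String)
    (hy : y ∈ pvChildren cm x) : y ∈ pvUniv cm := by
  rcases pvChildren_spec cm x with ⟨h1, _⟩ | ⟨p, hp, _, hv⟩
  · rw [h1] at hy; cases hy
  · rw [hv] at hy
    exact List.mem_flatMap.mpr ⟨p, hp, List.mem_cons_of_mem _ hy⟩

theorem pvChildren_length_le (cm : List (String × List String)) (x : String) :
    (pvChildren cm x).length ≤ (pvUniv cm).length := by
  rcases pvChildren_spec cm x with ⟨h1, _⟩ | ⟨p, hp, _, hv⟩
  · simp [h1]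
  · rw [hv]
    rcases List.append_of_mem hp with ⟨l1, l2, rfl⟩
    unfold pvUniv
    simp [List.flatMap_append]
    omega

theorem pvChildren_eq_nil_of_not_mem_univ (cm : List (String × List String)) (x : String)
    (hx : x ∉ pvUniv cm) : pvChildren cm x = [] := by
  rcases pvChildren_spec cm x with ⟨h1, _⟩ | ⟨p, hp, hk, _⟩
  · exact h1
  · exact absurd (List.mem_flatMap.mpr ⟨p, hp, by rw [hk]; exact List.mem_cons_self ..⟩) hx

-- membership in B's per-round union  nxt = ⋃_{n ∈ l} child_map.get(n, set())
theorem mem_foldl_union (cm : List (String × List String)) (l : List String)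
    (s : List String) (y : String) :
    y ∈ l.foldl (fun s n => PySem.Set.union s (pvChildren cm n)) s ↔
      y ∈ s ∨ ∃ n ∈ l, y ∈ pvChildren cm n := by
  induction l generalizing s with
  | nil => simp
  | cons n rest ih =>
      rw [List.foldl_cons, ih, PySem.Set.mem_union]
      constructor
      · rintro (⟨h | h⟩ | ⟨m, hm, hy⟩)
        · exact Or.inl h
        · exact Or.inr ⟨n, List.mem_cons_self .., h⟩
        · exact Or.inr ⟨m, List.mem_cons_of_mem _ hm, hy⟩
      · rintro (h | ⟨m, hm, hy⟩)
        · exact Or.inl (Or.inl h)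
        · rcases List.mem_cons.mp hm with rfl | hm'
          · exact Or.inl (Or.inr hy)
          · exact Or.inr ⟨m, hm', hy⟩

-- ===== PORT A =====
-- A's stack is represented top-first (Python pops from the END of the list): the initial
-- stack sorted(seeds) becomes (sorted seeds).reverse, and the block of children appended in
-- reverse-sorted order is prepended as its reverse.
def aLoop (cm : List (String × List String)) (visited : List String) (stack : List String) :
    List String :=
  match stack with
  | [] => visited
  | cur :: rest =>
      if PySem.Set.contains visited cur then
        aLoop cm visited rest
      else
        let visited' := PySem.Set.add visited cur
        let pushes := (PySem.List.sorted (pvChildren cm cur) (fun x => x) true).filter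
          (fun c => !(PySem.Set.contains visited' c))
        aLoop cm visited' (pushes.reverse ++ rest)
  termination_by ((pvUniv cm).toFinset \ visited.toFinset).card * ((pvUniv cm).length + 1) + stack.length
  decreasing_by
  · simp only [List.length_cons]; omega
  · rename_i h
    have hcur : cur ∉ visited := fun hm => h ((PySem.Set.contains_iff visited cur).mpr hm)
    have hadd : (PySem.Set.add visited cur).toFinset = insert cur visited.toFinset := by
      rw [PySem.Set.add_of_not_mem hcur]
      ext a; simp
    have hB : (pvUniv cm).toFinset \ (PySem.Set.add visited cur).toFinset
        = ((pvUniv cm).toFinset \ visited.toFinset).erase cur := by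
      rw [hadd, Finset.sdiff_insert]
    have hlen : ((PySem.List.sorted (pvChildren cm cur) (fun x => x) true).filter
        (fun c => !(PySem.Set.contains (PySem.Set.add visited cur) c))).length
          ≤ (pvUniv cm).length :=
      le_trans (List.length_filter_le _ _)
        (by rw [PySem.List.length_sorted]; exact pvChildren_length_le cm cur)
    rw [hB]
    simp only [List.length_append, List.length_reverse, List.length_cons]
    by_cases hu : cur ∈ pvUniv cm
    · have hmem : cur ∈ (pvUniv cm).toFinset \ visited.toFinset :=
        Finset.mem_sdiff.mpr ⟨List.mem_toFinset.mpr hu,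
          fun hc => hcur (List.mem_toFinset.mp hc)⟩
      have hcard := Finset.card_erase_add_one hmem
      have hmul : ((pvUniv cm).toFinset \ visited.toFinset).card * ((pvUniv cm).length + 1)
          = (((pvUniv cm).toFinset \ visited.toFinset).erase cur).card * ((pvUniv cm).length + 1)
            + ((pvUniv cm).length + 1) := by
        rw [← hcard, Nat.succ_mul]
      omega
    · have hnil : pvChildren cm cur = [] := pvChildren_eq_nil_of_not_mem_univ cm cur hu
      have hle : (((pvUniv cm).toFinset \ visited.toFinset).erase cur).card
          ≤ ((pvUniv cm).toFinset \ visited.toFinset).card := Finset.card_erase_le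
      have hmul := Nat.mul_le_mul_right ((pvUniv cm).length + 1) hle
      have h0 : ((PySem.List.sorted (pvChildren cm cur) (fun x => x) true).filter
          (fun c => !(PySem.Set.contains (PySem.Set.add visited cur) c))) = [] := by
        rw [hnil]; rfl
      rw [h0]
      simp only [List.length_nil]
      omega

def closure_from_seeds_py (seeds : List String) (child_map : List (String × List String)) : List String :=
  PySem.List.sorted (aLoop child_map [] ((PySem.List.sorted seeds (fun x => x) false).reverse)) (fun x => x) false

-- ===== PORT B =====
def bLoop (cm : List (String × List String)) (result : List String) (frontier : List String) :
    List String :=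
  if frontier = [] then result
  else
    let nxt := frontier.foldl (fun s n => PySem.Set.union s (pvChildren cm n)) PySem.Set.empty
    let frontier' := PySem.Set.diff nxt result
    bLoop cm (PySem.Set.union result frontier') frontier'
  termination_by ((pvUniv cm).toFinset \ result.toFinset).card * 2 + (if frontier = [] then 0 else 1)
  decreasing_by
  · rename_i h
    have hfold : List.foldl (fun (s : List String) (x : {x // x ∈ frontier}) =>
        PySem.Set.union s (pvChildren cm ↑x)) PySem.Set.empty frontier.attach
        = List.foldl (fun s n => PySem.Set.union s (pvChildren cm n)) PySem.Set.empty frontier := by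
      simp
    simp only [hfold]
    by_cases hf : PySem.Set.diff (frontier.foldl
        (fun s n => PySem.Set.union s (pvChildren cm n)) PySem.Set.empty) result = []
    · rw [hf]
      have : PySem.Set.union result ([] : List String) = result := rfl
      rw [this]
      simp [h]
    · rcases List.exists_mem_of_ne_nil _ hf with ⟨w, hw⟩
      have hw' := (PySem.Set.mem_diff ..).mp hw
      have hwin : w ∈ frontier.foldl
          (fun s n => PySem.Set.union s (pvChildren cm n)) PySem.Set.empty := hw'.1
      have hwuniv : w ∈ pvUniv cm := by
        rcases (mem_foldl_union cm frontier PySem.Set.empty w).mp hwin with hc | ⟨n, _, hc⟩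
        · cases hc
        · exact mem_pvChildren_mem_univ cm n w hc
      have hsub : (pvUniv cm).toFinset \ (PySem.Set.union result (PySem.Set.diff
            (frontier.foldl (fun s n => PySem.Set.union s (pvChildren cm n)) PySem.Set.empty)
            result)).toFinset
          ⊂ (pvUniv cm).toFinset \ result.toFinset := by
        constructor
        · intro a ha
          rcases Finset.mem_sdiff.mp ha with ⟨h1, h2⟩
          exact Finset.mem_sdiff.mpr ⟨h1, fun hc => h2 (List.mem_toFinset.mpr
            ((PySem.Set.mem_union ..).mpr (Or.inl (List.mem_toFinset.mp hc))))⟩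
        · intro hcont
          have hwA : w ∈ (pvUniv cm).toFinset \ result.toFinset :=
            Finset.mem_sdiff.mpr ⟨List.mem_toFinset.mpr hwuniv,
              fun hc => hw'.2 (List.mem_toFinset.mp hc)⟩
          have := Finset.mem_sdiff.mp (hcont hwA)
          exact this.2 (List.mem_toFinset.mpr ((PySem.Set.mem_union ..).mpr (Or.inr hw)))
      have hlt := Finset.card_lt_card hsub
      have h1 : (if PySem.Set.diff (frontier.foldl
          (fun s n => PySem.Set.union s (pvChildren cm n)) PySem.Set.empty) result = []
          then 0 else 1) ≤ 1 := by split <;> omega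
      simp only [h, if_false]
      omega

def closure_from_seeds_py_alt (seeds : List String) (child_map : List (String × List String)) : List String :=
  PySem.List.sorted (bLoop child_map (PySem.Set.ofList seeds) (PySem.Set.ofList seeds)) (fun x => x) false

-- ===== PRECONDITION & SPEC =====
def Spec_closure_from_seeds_py (seeds : List String) (child_map : List (String × List String)) (out : List String) : Prop := out = closure_from_seeds_py_alt seeds child_map
instance (seeds : List String) (child_map : List (String × List String)) (out : List String) : Decidable (Spec_closure_from_seeds_py seeds child_map out) := by unfold Spec_closure_from_seeds_py; infer_instance

-- ===== CLAIM (what is proved, stated in full; the proofs are below) =====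
def Claim_equal_closure_from_seeds_py : Prop := ∀ (seeds : List String) (child_map : List (String × List String)), Dom_closure_from_seeds_py seeds child_map → Spec_closure_from_seeds_py seeds child_map (closure_from_seeds_py seeds child_map)

-- ===== LEMMAS AND PROOFS =====

-- x is reachable from seeds along child_map edges
inductive pvReach (cm : List (String × List String)) (seeds : List String) : String → Prop
  | seed : ∀ {x}, x ∈ seeds → pvReach cm seeds x
  | step : ∀ {x y}, pvReach cm seeds x → y ∈ pvChildren cm x → pvReach cm seeds y

-- the elaborated B-loop folds over frontier.attach; same fold over frontier
theorem nxt_attach_eq (cm : List (String × List String)) (frontier : List String) :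
    List.foldl (fun (s : List String) (x : {x // x ∈ frontier}) =>
        PySem.Set.union s (pvChildren cm ↑x)) PySem.Set.empty frontier.attach
      = List.foldl (fun s n => PySem.Set.union s (pvChildren cm n)) PySem.Set.empty frontier := by
  simp

-- ---- A-side invariants ----
theorem mem_aLoop_of_mem_visited (cm : List (String × List String))
    (visited stack : List String) (x : String) (hx : x ∈ visited) :
    x ∈ aLoop cm visited stack := by
  fun_induction aLoop cm visited stack with
  | case1 => exact hx
  | case2 visited cur rest h ih => exact ih hx
  | case3 visited cur rest h vis' pushes ih => exact ih ((PySem.Set.mem_add ..).mpr (Or.inl hx))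

theorem mem_aLoop_of_mem_stack (cm : List (String × List String))
    (visited stack : List String) (x : String) (hx : x ∈ stack) :
    x ∈ aLoop cm visited stack := by
  fun_induction aLoop cm visited stack with
  | case1 => cases hx
  | case2 visited cur rest h ih =>
      rcases List.mem_cons.mp hx with rfl | hx'
      · exact mem_aLoop_of_mem_visited cm visited rest x ((PySem.Set.contains_iff visited x).mp h)
      · exact ih hx'
  | case3 visited cur rest h vis' pushes ih =>
      rcases List.mem_cons.mp hx with rfl | hx'
      · exact mem_aLoop_of_mem_visited cm _ _ x ((PySem.Set.mem_add ..).mpr (Or.inr rfl))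
      · exact ih (List.mem_append_right _ hx')

theorem aLoop_sound (cm : List (String × List String)) (P : String → Prop)
    (hcl : ∀ a b, P a → b ∈ pvChildren cm a → P b)
    (visited stack : List String)
    (hv : ∀ v ∈ visited, P v) (hs : ∀ s ∈ stack, P s) :
    ∀ x ∈ aLoop cm visited stack, P x := by
  fun_induction aLoop cm visited stack with
  | case1 => exact hv
  | case2 visited cur rest h ih =>
      exact ih hv (fun s hs' => hs s (List.mem_cons_of_mem _ hs'))
  | case3 visited cur rest h vis' pushes ih =>
      have hPcur : P cur := hs cur (List.mem_cons_self ..)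
      refine ih ?_ ?_
      · intro v hv'
        rcases (PySem.Set.mem_add ..).mp hv' with h' | rfl
        · exact hv v h'
        · exact hPcur
      · intro s hs'
        rcases List.mem_append.mp hs' with h' | h'
        · have h2 := List.mem_filter.mp (List.mem_reverse.mp h')
          exact hcl cur s hPcur ((PySem.List.mem_sorted ..).mp h2.1)
        · exact hs s (List.mem_cons_of_mem _ h')

theorem aLoop_closed (cm : List (String × List String)) (visited stack : List String)
    (hinv : ∀ a ∈ visited, ∀ b ∈ pvChildren cm a, b ∈ visited ∨ b ∈ stack) :
    ∀ x ∈ aLoop cm visited stack, ∀ y ∈ pvChildren cm x, y ∈ aLoop cm visited stack := by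
  fun_induction aLoop cm visited stack with
  | case1 =>
      intro x hx y hy
      rcases hinv x hx y hy with h' | h'
      · exact h'
      · cases h'
  | case2 visited cur rest h ih =>
      refine ih ?_
      intro a ha b hb
      rcases hinv a ha b hb with h' | h'
      · exact Or.inl h'
      · rcases List.mem_cons.mp h' with rfl | h''
        · exact Or.inl ((PySem.Set.contains_iff visited b).mp h)
        · exact Or.inr h''
  | case3 visited cur rest h vis' pushes ih =>
      refine ih ?_
      intro a ha b hb
      rcases (PySem.Set.mem_add ..).mp ha with ha' | rfl
      · rcases hinv a ha' b hb with h' | h'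
        · exact Or.inl ((PySem.Set.mem_add ..).mpr (Or.inl h'))
        · rcases List.mem_cons.mp h' with rfl | h''
          · exact Or.inl ((PySem.Set.mem_add ..).mpr (Or.inr rfl))
          · exact Or.inr (List.mem_append_right _ h'')
      · by_cases hbv : b ∈ PySem.Set.add visited a
        · exact Or.inl hbv
        · refine Or.inr (List.mem_append_left _ (List.mem_reverse.mpr
            (List.mem_filter.mpr ⟨(PySem.List.mem_sorted ..).mpr hb, ?_⟩)))
          simp only [Bool.not_eq_true']
          exact Bool.eq_false_iff.mpr (fun hc => hbv ((PySem.Set.contains_iff ..).mp hc))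
      

theorem aLoop_nodup (cm : List (String × List String)) (visited stack : List String)
    (h : visited.Nodup) : (aLoop cm visited stack).Nodup := by
  fun_induction aLoop cm visited stack with
  | case1 => exact h
  | case2 visited cur rest hc ih => exact ih h
  | case3 visited cur rest hc vis' pushes ih => exact ih (PySem.Set.nodup_add _ _ h)

-- ---- B-side invariants ----
theorem mem_bLoop_of_mem_result (cm : List (String × List String))
    (result frontier : List String) (x : String) (hx : x ∈ result) :
    x ∈ bLoop cm result frontier := by
  fun_induction bLoop cm result frontier with
  | case1 => exact hx
  | case2 result frontier h nxt f' ih =>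
      have hnxt : nxt = List.foldl (fun s n => PySem.Set.union s (pvChildren cm n))
          PySem.Set.empty frontier := nxt_attach_eq cm frontier
      show x ∈ bLoop cm (PySem.Set.union result (PySem.Set.diff (List.foldl
        (fun s n => PySem.Set.union s (pvChildren cm n)) PySem.Set.empty frontier) result))
        (PySem.Set.diff (List.foldl (fun s n => PySem.Set.union s (pvChildren cm n))
          PySem.Set.empty frontier) result)
      rw [← hnxt]
      exact ih ((PySem.Set.mem_union ..).mpr (Or.inl hx))

theorem bLoop_sound (cm : List (String × List String)) (P : String → Prop)
    (hcl : ∀ a b, P a → b ∈ pvChildren cm a → P b)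
    (result frontier : List String)
    (hsub : ∀ x ∈ frontier, x ∈ result) (hr : ∀ v ∈ result, P v) :
    ∀ x ∈ bLoop cm result frontier, P x := by
  fun_induction bLoop cm result frontier with
  | case1 => exact hr
  | case2 result frontier h nxt f' ih =>
      have hnxt : nxt = List.foldl (fun s n => PySem.Set.union s (pvChildren cm n))
          PySem.Set.empty frontier := nxt_attach_eq cm frontier
      show ∀ x ∈ bLoop cm (PySem.Set.union result (PySem.Set.diff (List.foldl (fun s n => PySem.Set.union s (pvChildren cm n)) PySem.Set.empty frontier) result)) (PySem.Set.diff (List.foldl (fun s n => PySem.Set.union s (pvChildren cm n)) PySem.Set.empty frontier) result), P x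
      rw [← hnxt]
      refine ih ?_ ?_
      · intro y hy
        exact (PySem.Set.mem_union ..).mpr (Or.inr hy)
      · intro v hv
        rcases (PySem.Set.mem_union ..).mp hv with h' | h'
        · exact hr v h'
        · have h2 := (PySem.Set.mem_diff ..).mp h'
          rcases (mem_foldl_union cm frontier PySem.Set.empty v).mp (hnxt ▸ h2.1)
            with hc | ⟨n, hn, hc⟩
          · cases hc
          · exact hcl n v (hr n (hsub n hn)) hc

theorem bLoop_closed (cm : List (String × List String)) (result frontier : List String)
    (hinv : ∀ a ∈ result, a ∈ frontier ∨ ∀ b ∈ pvChildren cm a, b ∈ result) :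
    ∀ x ∈ bLoop cm result frontier, ∀ y ∈ pvChildren cm x, y ∈ bLoop cm result frontier := by
  fun_induction bLoop cm result frontier with
  | case1 =>
      intro x hx y hy
      rcases hinv x hx with h' | h'
      · cases h'
      · exact h' y hy
  | case2 result frontier h nxt f' ih =>
      have hnxt : nxt = List.foldl (fun s n => PySem.Set.union s (pvChildren cm n))
          PySem.Set.empty frontier := nxt_attach_eq cm frontier
      show ∀ x ∈ bLoop cm (PySem.Set.union result (PySem.Set.diff (List.foldl (fun s n => PySem.Set.union s (pvChildren cm n)) PySem.Set.empty frontier) result)) (PySem.Set.diff (List.foldl (fun s n => PySem.Set.union s (pvChildren cm n)) PySem.Set.empty frontier) result), ∀ y ∈ pvChildren cm x, y ∈ bLoop cm (PySem.Set.union result (PySem.Set.diff (List.foldl (fun s n => PySem.Set.union s (pvChildren cm n)) PySem.Set.empty frontier) result)) (PySem.Set.diff (List.foldl (fun s n => PySem.Set.union s (pvChildren cm n)) PySem.Set.empty frontier) result)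
      rw [← hnxt]
      refine ih ?_
      intro a ha
      rcases (PySem.Set.mem_union ..).mp ha with ha' | ha'
      · rcases hinv a ha' with hf | hcl
        · right
          intro b hb
          have hbn : b ∈ nxt := hnxt ▸
            (mem_foldl_union cm frontier PySem.Set.empty b).mpr (Or.inr ⟨a, hf, hb⟩)
          by_cases hbr : b ∈ result
          · exact (PySem.Set.mem_union ..).mpr (Or.inl hbr)
          · exact (PySem.Set.mem_union ..).mpr (Or.inr ((PySem.Set.mem_diff ..).mpr ⟨hbn, hbr⟩))
        · right
          intro b hb
          exact (PySem.Set.mem_union ..).mpr (Or.inl (hcl b hb))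
      · exact Or.inl ha'

theorem bLoop_nodup (cm : List (String × List String)) (result frontier : List String)
    (h : result.Nodup) : (bLoop cm result frontier).Nodup := by
  fun_induction bLoop cm result frontier with
  | case1 => exact h
  | case2 result frontier hf nxt f' ih =>
      have hnxt : nxt = (List.foldl (fun s n => PySem.Set.union s (pvChildren cm n)) PySem.Set.empty frontier) := nxt_attach_eq cm frontier
      show (bLoop cm (PySem.Set.union result (PySem.Set.diff (List.foldl (fun s n => PySem.Set.union s (pvChildren cm n)) PySem.Set.empty frontier) result)) (PySem.Set.diff (List.foldl (fun s n => PySem.Set.union s (pvChildren cm n)) PySem.Set.empty frontier) result)).Nodup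
      rw [← hnxt]
      exact ih (PySem.Set.nodup_union _ _ h)

-- ---- both loops compute exactly the reachable set ----
theorem mem_aLoop_iff (cm : List (String × List String)) (seeds : List String) (x : String) :
    x ∈ aLoop cm [] ((PySem.List.sorted seeds (fun x => x) false).reverse) ↔
      pvReach cm seeds x := by
  constructor
  · intro hx
    refine aLoop_sound cm (pvReach cm seeds) (fun a b ha hb => pvReach.step ha hb) _ _
      (by intro v hv; cases hv) ?_ x hx
    intro s hs
    exact pvReach.seed ((PySem.List.mem_sorted ..).mp (List.mem_reverse.mp hs))
  · intro hr
    induction hr with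
    | seed h =>
        exact mem_aLoop_of_mem_stack cm [] _ _
          (List.mem_reverse.mpr ((PySem.List.mem_sorted ..).mpr h))
    | step hr hc ih =>
        exact aLoop_closed cm [] _ (by intro a ha; cases ha) _ ih _ hc

theorem mem_bLoop_iff (cm : List (String × List String)) (seeds : List String) (x : String) :
    x ∈ bLoop cm (PySem.Set.ofList seeds) (PySem.Set.ofList seeds) ↔ pvReach cm seeds x := by
  constructor
  · intro hx
    exact bLoop_sound cm (pvReach cm seeds) (fun a b ha hb => pvReach.step ha hb) _ _
      (fun y hy => hy) (fun v hv => pvReach.seed ((PySem.Set.mem_ofList ..).mp hv)) x hx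
  · intro hr
    induction hr with
    | seed h =>
        exact mem_bLoop_of_mem_result cm _ _ _ ((PySem.Set.mem_ofList ..).mpr h)
    | step hr hc ih =>
        exact bLoop_closed cm _ _ (fun a ha => Or.inl ha) _ ih _ hc

-- ===== VERDICT (by name: the statement is the Claim_ definition above) =====
theorem closure_from_seeds_py_spec : Claim_equal_closure_from_seeds_py := by
  intro seeds cm _
  show _ = _
  unfold closure_from_seeds_py closure_from_seeds_py_alt
  apply PySem.List.sorted_eq_sorted_of_perm _ _ _ (fun a b h => h)
  apply (List.perm_ext_iff_of_nodup (aLoop_nodup cm _ _ List.nodup_nil)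
    (bLoop_nodup cm _ _ (PySem.Set.nodup_ofList seeds))).mpr
  intro a
  rw [mem_aLoop_iff, mem_bLoop_iff]
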